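-- pv_equiv track=rewrite | github.com/MrBrantCode/unitest_baseline | mut_generate/mist_train_cf/cf_92847/solution.py | classify_animals
-- ===== SOURCE A (Python) =====
-- def classify_animals(animals):
--     if not animals:
--         raise Exception("Input list is empty.")
--
--     animal_dict = {"mammal": [], "reptile": []}
--
--     for animal in animals:
--         if animal not in animal_dict["mammal"] and animal not in animal_dict["reptile"]:
--             if animal in ["dog", "elephant"]:
--                 animal_dict["mammal"].append(animal)
--             elif animal in ["snake", "turtle"]:
--                 animal_dict["reptile"].append(animal)
--
--     return animal_dict
-- ===== SOURCE B (Python) =====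
-- def classify_animals(animals):
--     if not animals:
--         raise Exception("Input list is empty.")
--
--     def ordered(candidates):
--         # locate each known candidate's first occurrence, order by it
--         found = [(animals.index(a), a) for a in candidates if a in animals]
--         found.sort(key=lambda p: p[0])
--         return [a for _, a in found]
--
--     return {"mammal": ordered(("dog", "elephant")),
--             "reptile": ordered(("snake", "turtle"))}
-- ===== Notes on version B (the rewrite author's own statement) =====
-- stated objective: alternative
-- what changed: B inverts the iteration: instead of scanning the input and deduplicating into category lists element by element, it loops over the fixed four-word vocabulary, finds each candidate's first-occurrence index in the input, and orders each category's found candidates by that index.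
import Mathlib
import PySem

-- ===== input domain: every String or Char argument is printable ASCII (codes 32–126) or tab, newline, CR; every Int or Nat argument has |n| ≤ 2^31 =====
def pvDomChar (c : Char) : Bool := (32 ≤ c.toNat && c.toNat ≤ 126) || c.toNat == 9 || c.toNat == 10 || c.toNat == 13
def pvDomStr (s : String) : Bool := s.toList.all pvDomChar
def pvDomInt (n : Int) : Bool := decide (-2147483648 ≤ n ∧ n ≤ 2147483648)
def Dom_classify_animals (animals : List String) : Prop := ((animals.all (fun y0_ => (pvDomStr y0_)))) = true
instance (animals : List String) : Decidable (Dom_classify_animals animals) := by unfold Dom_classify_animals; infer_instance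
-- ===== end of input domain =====

-- B inverts the iteration: instead of scanning the input and deduplicating into the two
-- lists, it loops over the fixed four-word vocabulary, locates each candidate's first
-- occurrence index in the input, and orders each category by that index (alternative).

-- ===== PORT A =====
-- one iteration of A's for-loop; state = (animal_dict["mammal"], animal_dict["reptile"])
def classAStep (st : List String × List String) (animal : String) : List String × List String :=
  if animal ∉ st.1 ∧ animal ∉ st.2 then
    if animal ∈ (["dog", "elephant"] : List String) then (st.1 ++ [animal], st.2)
    else if animal ∈ (["snake", "turtle"] : List String) then (st.1, st.2 ++ [animal])
    else st
  else st

def classify_animals (animals : List String) : List (String × List String) :=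
  -- on empty input A raises (excluded by Pre_); the dict is returned in insertion order
  let st := animals.foldl classAStep ([], [])
  [("mammal", st.1), ("reptile", st.2)]

-- ===== PORT B =====
-- B's helper 'ordered': candidates present in the input, ordered by first-occurrence index
def orderedB (animals : List String) (candidates : List String) : List String :=
  let found := (candidates.filter (fun a => decide (a ∈ animals))).map
      (fun a => ((PySem.List.index? animals a).getD 0, a))
  let found := PySem.List.sorted found (fun p => p.1) false
  found.map (fun p => p.2)

def classify_animals_alt (animals : List String) : List (String × List String) :=
  [("mammal", orderedB animals ["dog", "elephant"]),
   ("reptile", orderedB animals ["snake", "turtle"])]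

-- ===== PRECONDITION & SPEC =====
-- A raises Exception on the empty list; Pre_ excludes exactly that input.
def Pre_classify_animals (animals : List String) : Prop := animals ≠ []
instance (animals : List String) : Decidable (Pre_classify_animals animals) := by unfold Pre_classify_animals; infer_instance
def pvWitness_classify_animals : List String := (["dog", "snake", "dog", "cat"])

def Spec_classify_animals (animals : List String) (out : List (String × List String)) : Prop := out = classify_animals_alt animals
instance (animals : List String) (out : List (String × List String)) : Decidable (Spec_classify_animals animals out) := by unfold Spec_classify_animals; infer_instance

-- ===== CLAIM (what is proved, stated in full; the proofs are below) =====
def Claim_equal_classify_animals : Prop := ∀ (animals : List String), Dom_classify_animals animals → Pre_classify_animals animals → Spec_classify_animals animals (classify_animals animals)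

-- ===== LEMMAS AND PROOFS =====

-- first-occurrence dedup step (proof-side model of A's membership-guarded append)
def dedupStep (acc : List String) (a : String) : List String :=
  if a ∈ acc then acc else acc ++ [a]

def mamB (a : String) : Bool := decide (a ∈ (["dog", "elephant"] : List String))
def repB (a : String) : Bool := decide (a ∈ (["snake", "turtle"] : List String))

-- the canonical value of one category, read off the two first-occurrence indices
def pairCanon (c1 c2 : String) (o1 o2 : Option Nat) : List String :=
  match o1, o2 with
  | none, none => []
  | some _, none => [c1]
  | none, some _ => [c2]
  | some i, some j => if i ≤ j then [c1, c2] else [c2, c1]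

lemma mam_not_rep {a : String} (h : mamB a = true) : repB a = false := by
  simp [mamB, repB] at *
  rcases h with h | h <;> subst h <;> decide

-- A's loop separates into two dedup-folds over the two filtered streams
lemma foldA (l : List String) (ms rs : List String)
    (hm : ∀ a ∈ ms, mamB a = true) (hr : ∀ a ∈ rs, repB a = true) :
    l.foldl classAStep (ms, rs) =
      ((l.filter mamB).foldl dedupStep ms, (l.filter repB).foldl dedupStep rs) := by
  induction l generalizing ms rs with
  | nil => simp
  | cons a t ih =>
    by_cases hma : mamB a = true
    · have hra : repB a = false := mam_not_rep hma
      have hf1 : (a :: t).filter mamB = a :: t.filter mamB := by simp [hma]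
      have hf2 : (a :: t).filter repB = t.filter repB := by simp [hra]
      have hnr : a ∉ rs := fun h => by simp [hr a h] at hra
      by_cases hms : a ∈ ms
      · have hstep : classAStep (ms, rs) a = (ms, rs) := by simp [classAStep, hms]
        have hd : dedupStep ms a = ms := by simp [dedupStep, hms]
        rw [List.foldl_cons, hstep, hf1, hf2, List.foldl_cons, hd]
        exact ih ms rs hm hr
      · have hstep : classAStep (ms, rs) a = (ms ++ [a], rs) := by
          have : a ∈ (["dog", "elephant"] : List String) := by simpa [mamB] using hma
          simp [classAStep, hms, hnr, this]
        have hd : dedupStep ms a = ms ++ [a] := by simp [dedupStep, hms]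
        rw [List.foldl_cons, hstep, hf1, hf2, List.foldl_cons, hd]
        exact ih (ms ++ [a]) rs
          (by intro x hx; rcases List.mem_append.1 hx with h | h
              · exact hm x h
              · simp at h; subst h; exact hma)
          hr
    · have hf1 : (a :: t).filter mamB = t.filter mamB := by simp [hma]
      by_cases hra : repB a = true
      · have hf2 : (a :: t).filter repB = a :: t.filter repB := by simp [hra]
        have hnm : a ∉ ms := fun h => hma (hm a h)
        by_cases hrs : a ∈ rs
        · have hstep : classAStep (ms, rs) a = (ms, rs) := by simp [classAStep, hrs]
          have hd : dedupStep rs a = rs := by simp [dedupStep, hrs]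
          rw [List.foldl_cons, hstep, hf1, hf2, List.foldl_cons, hd]
          exact ih ms rs hm hr
        · have hstep : classAStep (ms, rs) a = (ms, rs ++ [a]) := by
            have h1 : a ∉ (["dog", "elephant"] : List String) := by simpa [mamB] using hma
            have h2 : a ∈ (["snake", "turtle"] : List String) := by simpa [repB] using hra
            simp [classAStep, hnm, hrs, h1, h2]
          have hd : dedupStep rs a = rs ++ [a] := by simp [dedupStep, hrs]
          rw [List.foldl_cons, hstep, hf1, hf2, List.foldl_cons, hd]
          exact ih ms (rs ++ [a]) hm
            (by intro x hx; rcases List.mem_append.1 hx with h | h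
                · exact hr x h
                · simp at h; subst h; exact hra)
      · have hf2 : (a :: t).filter repB = t.filter repB := by simp [hra]
        have hstep : classAStep (ms, rs) a = (ms, rs) := by
          have h1 : a ∉ (["dog", "elephant"] : List String) := by simpa [mamB] using hma
          have h2 : a ∉ (["snake", "turtle"] : List String) := by simpa [repB] using hra
          simp [classAStep, h1, h2]
        rw [List.foldl_cons, hstep, hf1, hf2]
        exact ih ms rs hm hr

-- the dedup fold is the accumulator once everything in the stream is already there
lemma dedup_absorb (s acc : List String) (h : ∀ x ∈ s, x ∈ acc) :
    s.foldl dedupStep acc = acc := by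
  induction s with
  | nil => rfl
  | cons x t ih =>
    have hx : x ∈ acc := h x (by simp)
    rw [List.foldl_cons]
    simp only [dedupStep, if_pos hx]
    exact ih (fun y hy => h y (by simp [hy]))

-- dedup fold from [d1] over a {d1,d2}-stream
lemma dedup_from_one (d1 d2 : String) (hne : d1 ≠ d2) (s : List String)
    (hsub : ∀ x ∈ s, x = d1 ∨ x = d2) :
    s.foldl dedupStep [d1] = if d2 ∈ s then [d1, d2] else [d1] := by
  induction s with
  | nil => simp
  | cons x t ih =>
    rcases hsub x (by simp) with h | h
    · subst h
      have hstep : dedupStep [x] x = [x] := by simp [dedupStep]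
      rw [List.foldl_cons, hstep, ih (fun y hy => hsub y (by simp [hy]))]
      by_cases hd : d2 ∈ t <;> simp [hd, Ne.symm hne]
    · subst h
      have hstep : dedupStep [d1] x = [d1, x] := by
        have hx : x ∉ ([d1] : List String) := by
          simp only [List.mem_singleton]
          exact fun h => hne h.symm
        simp [dedupStep, hx]
      rw [List.foldl_cons, hstep,
        dedup_absorb t [d1, x] (fun y hy => by
          rcases hsub y (by simp [hy]) with h | h <;> simp [h])]
      simp

-- the dedup fold over the two-word filter, in terms of the first-occurrence indices
lemma dedup_filter_pair (c1 c2 : String) (hne : c1 ≠ c2) (l : List String) :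
    (l.filter (fun a => decide (a ∈ ([c1, c2] : List String)))).foldl dedupStep [] =
      pairCanon c1 c2 (PySem.List.index? l c1) (PySem.List.index? l c2) := by
  induction l with
  | nil => simp [pairCanon]
  | cons a t ih =>
    by_cases h1 : a = c1
    · subst h1
      have hf : (a :: t).filter (fun x => decide (x ∈ ([a, c2] : List String))) =
          a :: t.filter (fun x => decide (x ∈ ([a, c2] : List String))) := by simp
      have hstep : dedupStep [] a = [a] := by simp [dedupStep]
      rw [hf, List.foldl_cons, hstep,
        dedup_from_one a c2 hne _ (fun x hx => by
          have := (List.mem_filter.1 hx).2; simp at this; tauto)]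
      rw [PySem.List.index?_cons_self, PySem.List.index?_cons_of_ne t hne]
      cases hidx : PySem.List.index? t c2 with
      | none =>
        have hnot : c2 ∉ t := (PySem.List.index?_eq_none_iff _ _).1 hidx
        simp [pairCanon, hnot]
      | some k =>
        have hmem : c2 ∈ t := by
          have hs : (PySem.List.index? t c2).isSome := by rw [hidx]; rfl
          exact (PySem.List.index?_isSome_iff _ _).1 hs
        simp [pairCanon, hmem]
    · by_cases h2 : a = c2
      · subst h2
        have hf : (a :: t).filter (fun x => decide (x ∈ ([c1, a] : List String))) =
            a :: t.filter (fun x => decide (x ∈ ([c1, a] : List String))) := by simp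
        have hstep : dedupStep [] a = [a] := by simp [dedupStep]
        rw [hf, List.foldl_cons, hstep,
          dedup_from_one a c1 (Ne.symm hne) _ (fun x hx => by
            have := (List.mem_filter.1 hx).2; simp at this; tauto)]
        rw [PySem.List.index?_cons_self, PySem.List.index?_cons_of_ne t (Ne.symm hne)]
        cases hidx : PySem.List.index? t c1 with
        | none =>
          have hnot : c1 ∉ t := (PySem.List.index?_eq_none_iff _ _).1 hidx
          simp [pairCanon, hnot]
        | some k =>
          have hmem : c1 ∈ t := by
            have hs : (PySem.List.index? t c1).isSome := by rw [hidx]; rfl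
            exact (PySem.List.index?_isSome_iff _ _).1 hs
          simp [pairCanon, hmem]
      · have hf : (a :: t).filter (fun x => decide (x ∈ ([c1, c2] : List String))) =
            t.filter (fun x => decide (x ∈ ([c1, c2] : List String))) := by
          simp [h1, h2]
        rw [hf, ih,
          PySem.List.index?_cons_of_ne t h1,
          PySem.List.index?_cons_of_ne t h2]
        cases PySem.List.index? t c1 with
        | none => cases PySem.List.index? t c2 <;> simp [pairCanon]
        | some i =>
          cases PySem.List.index? t c2 with
          | none => simp [pairCanon]
          | some j =>
            simp only [Option.map_some, pairCanon]
            by_cases hij : i ≤ j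
            · rw [if_pos hij, if_pos (by omega)]
            · rw [if_neg hij, if_neg (by omega)]

-- two distinct words have distinct first-occurrence indices
lemma index?_ne {l : List String} {c1 c2 : String} {i j : Nat}
    (h1 : PySem.List.index? l c1 = some i) (h2 : PySem.List.index? l c2 = some j)
    (hne : c1 ≠ c2) : i ≠ j := by
  intro hij
  obtain ⟨hk1, he1, -⟩ := PySem.List.getElem_of_index?_eq_some h1
  obtain ⟨hk2, he2, -⟩ := PySem.List.getElem_of_index?_eq_some h2
  subst hij
  exact hne (he1 ▸ he2 ▸ rfl)

-- B's 'ordered' produces the same canonical value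
lemma orderedB_eq (l : List String) (c1 c2 : String) (hne : c1 ≠ c2) :
    orderedB l [c1, c2] = pairCanon c1 c2 (PySem.List.index? l c1) (PySem.List.index? l c2) := by
  simp only [orderedB]
  by_cases hm1 : c1 ∈ l
  · obtain ⟨i, hi⟩ := Option.isSome_iff_exists.1 ((PySem.List.index?_isSome_iff _ _).2 hm1)
    have hi' : List.idxOf? c1 l = some i := by rw [← PySem.List.index?_eq_idxOf?]; exact hi
    by_cases hm2 : c2 ∈ l
    · obtain ⟨j, hj⟩ := Option.isSome_iff_exists.1 ((PySem.List.index?_isSome_iff _ _).2 hm2)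
      have hj' : List.idxOf? c2 l = some j := by rw [← PySem.List.index?_eq_idxOf?]; exact hj
      have hij : i ≠ j := index?_ne hi hj hne
      have hfe : ([c1, c2].filter (fun a => decide (a ∈ l))).map
          (fun a => ((PySem.List.index? l a).getD 0, a)) = [(i, c1), (j, c2)] := by
        simp [hm1, hm2, hi', hj']
      rw [hfe]
      rcases Nat.lt_or_ge i j with hlt | hge
      · rw [PySem.List.sorted_eq_self_of_pairwise _ _ (by simp [Nat.le_of_lt hlt])]
        simp [pairCanon, hi', hj', Nat.le_of_lt hlt]
      · have hlt : j < i := Nat.lt_of_le_of_ne hge (fun h => hij h.symm)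
        rw [PySem.List.sorted_eq_of_perm_of_pairwise_lt _ [(j, c2), (i, c1)] _
          (List.Perm.swap (i, c1) (j, c2) []) (by simp [hlt])]
        simp [pairCanon, hi', hj', Nat.not_le.2 hlt]
    · have hj : PySem.List.index? l c2 = none := (PySem.List.index?_eq_none_iff _ _).2 hm2
      have hj' : List.idxOf? c2 l = none := by rw [← PySem.List.index?_eq_idxOf?]; exact hj
      have hfe : ([c1, c2].filter (fun a => decide (a ∈ l))).map
          (fun a => ((PySem.List.index? l a).getD 0, a)) = [(i, c1)] := by
        simp [hm1, hm2, hi']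
      rw [hfe, PySem.List.sorted_eq_self_of_pairwise _ _ (by simp)]
      simp [pairCanon, hi', hj']
  · have hi : PySem.List.index? l c1 = none := (PySem.List.index?_eq_none_iff _ _).2 hm1
    have hi' : List.idxOf? c1 l = none := by rw [← PySem.List.index?_eq_idxOf?]; exact hi
    by_cases hm2 : c2 ∈ l
    · obtain ⟨j, hj⟩ := Option.isSome_iff_exists.1 ((PySem.List.index?_isSome_iff _ _).2 hm2)
      have hj' : List.idxOf? c2 l = some j := by rw [← PySem.List.index?_eq_idxOf?]; exact hj
      have hfe : ([c1, c2].filter (fun a => decide (a ∈ l))).map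
          (fun a => ((PySem.List.index? l a).getD 0, a)) = [(j, c2)] := by
        simp [hm1, hm2, hj']
      rw [hfe, PySem.List.sorted_eq_self_of_pairwise _ _ (by simp)]
      simp [pairCanon, hi', hj']
    · have hj : PySem.List.index? l c2 = none := (PySem.List.index?_eq_none_iff _ _).2 hm2
      have hj' : List.idxOf? c2 l = none := by rw [← PySem.List.index?_eq_idxOf?]; exact hj
      have hfe : ([c1, c2].filter (fun a => decide (a ∈ l))).map
          (fun a => ((PySem.List.index? l a).getD 0, a)) = [] := by
        simp [hm1, hm2]
      rw [hfe, PySem.List.sorted_eq_self_of_pairwise _ _ (by simp)]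
      simp [pairCanon, hi', hj']

-- ===== VERDICT (by name: the statement is the Claim_ definition above) =====
theorem classify_animals_spec : Claim_equal_classify_animals := by
  intro animals _ _
  show classify_animals animals = classify_animals_alt animals
  simp only [classify_animals, classify_animals_alt]
  rw [foldA animals [] [] (by simp) (by simp)]
  have hm : animals.filter mamB =
      animals.filter (fun a => decide (a ∈ (["dog", "elephant"] : List String))) := rfl
  have hr : animals.filter repB =
      animals.filter (fun a => decide (a ∈ (["snake", "turtle"] : List String))) := rfl
  rw [hm, hr, dedup_filter_pair _ _ (by decide), dedup_filter_pair _ _ (by decide),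
    ← orderedB_eq animals "dog" "elephant" (by decide),
    ← orderedB_eq animals "snake" "turtle" (by decide)]
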